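-- pv_equiv track=rewrite | github.com/WannaBeSuperteur/AI-study | Generative AI/Project 002. Conditional VAE 를 이용한 사람 얼굴 생성하기/add_face_location_info.py | first_consecutive_2_whites
-- ===== SOURCE A (Python) =====
-- def first_consecutive_2_whites(arr):
--     arr_size = len(arr)
--     cur_consecutive_whites = 0
--
--     for i in range(arr_size):
--         if arr[i] > 0:
--             cur_consecutive_whites += 1
--             if cur_consecutive_whites >= 2:
--                 return i - 1
--         else:
--             cur_consecutive_whites = 0
--
--     return arr_size
-- ===== SOURCE B (Python) =====
-- def first_consecutive_2_whites(arr):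
--     pos = [i for i, x in enumerate(arr) if x > 0]
--     for p, q in zip(pos, pos[1:]):
--         if q == p + 1:
--             return p
--     return len(arr)
-- ===== Notes on version B (the rewrite author's own statement) =====
-- stated objective: alternative
-- what changed: Replaces A's single stateful scan with a running counter by a staged computation: first extract the index list of positive entries, then search that derived list for the first adjacent pair of indices differing by 1.
import Mathlib
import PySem

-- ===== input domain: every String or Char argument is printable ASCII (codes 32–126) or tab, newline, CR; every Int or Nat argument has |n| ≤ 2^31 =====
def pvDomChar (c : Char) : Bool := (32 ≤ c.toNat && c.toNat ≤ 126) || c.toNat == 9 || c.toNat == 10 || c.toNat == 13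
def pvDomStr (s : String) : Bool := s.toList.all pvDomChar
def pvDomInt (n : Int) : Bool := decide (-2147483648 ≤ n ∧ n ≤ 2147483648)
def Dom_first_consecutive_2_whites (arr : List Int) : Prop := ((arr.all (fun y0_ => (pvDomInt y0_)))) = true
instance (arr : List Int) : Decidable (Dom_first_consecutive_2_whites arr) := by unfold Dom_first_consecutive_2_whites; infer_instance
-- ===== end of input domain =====

-- B replaces A's stateful counter scan by a staged computation: extract the indices of
-- positive entries, then find the first adjacent pair of indices differing by 1 (objective: alternative).

-- ===== PORT A =====
-- loop over the remaining list, carrying the current index i and the counter c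
def pvGoA : List Int → Int → Int → Int
  | [], i, _ => i
  | x :: rest, i, c =>
    if x > 0 then
      (if c + 1 ≥ 2 then i - 1 else pvGoA rest (i + 1) (c + 1))
    else
      pvGoA rest (i + 1) 0

def first_consecutive_2_whites (arr : List Int) : Int := pvGoA arr 0 0

-- ===== PORT B =====
-- pos = [i for i, x in enumerate(arr) if x > 0]  (index carried as parameter)
def pvPos : List Int → Int → List Int
  | [], _ => []
  | x :: t, i => if x > 0 then i :: pvPos t (i + 1) else pvPos t (i + 1)

-- for p, q in zip(pos, pos[1:]): if q == p + 1: return p   — scan of adjacent pairs of pos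
def pvFindAdj : List Int → Option Int
  | p :: q :: rest => if q = p + 1 then some p else pvFindAdj (q :: rest)
  | _ => none

def first_consecutive_2_whites_alt (arr : List Int) : Int :=
  match pvFindAdj (pvPos arr 0) with
  | some p => p
  | none => (arr.length : Int)

-- ===== PRECONDITION & SPEC =====
def Spec_first_consecutive_2_whites (arr : List Int) (out : Int) : Prop := out = first_consecutive_2_whites_alt arr
instance (arr : List Int) (out : Int) : Decidable (Spec_first_consecutive_2_whites arr out) := by unfold Spec_first_consecutive_2_whites; infer_instance

-- ===== CLAIM (what is proved, stated in full; the proofs are below) =====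
def Claim_equal_first_consecutive_2_whites : Prop := ∀ (arr : List Int), Dom_first_consecutive_2_whites arr → Spec_first_consecutive_2_whites arr (first_consecutive_2_whites arr)

-- ===== LEMMAS AND PROOFS =====

-- proof-side bridge: the stateless adjacent-pair scan both ports are equated to
def pvGoB : List Int → Int → Int
  | [], i => i
  | [_], i => i + 1
  | x :: y :: rest, i =>
    if x > 0 ∧ y > 0 then i else pvGoB (y :: rest) (i + 1)

theorem pvGoB_cons_nonpos (x : Int) (t : List Int) (i : Int) (hx : ¬ x > 0) :
    pvGoB (x :: t) i = pvGoB t (i + 1) := by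
  cases t with
  | nil => simp [pvGoB]
  | cons y r => simp [pvGoB, hx]

theorem pvGo_key (l : List Int) :
    (∀ i, pvGoA l i 0 = pvGoB l i) ∧
    (∀ i, pvGoA l i 1 =
      match l with
      | [] => i
      | y :: rest => if y > 0 then i - 1 else pvGoB rest (i + 1)) := by
  induction l with
  | nil => exact ⟨fun i => rfl, fun i => rfl⟩
  | cons x t ih =>
    obtain ⟨h0, h1⟩ := ih
    constructor
    · intro i
      by_cases hx : x > 0
      · have : pvGoA (x :: t) i 0 = pvGoA t (i + 1) 1 := by
          simp [pvGoA, hx]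
        rw [this, h1]
        cases t with
        | nil => simp [pvGoB]
        | cons y rest =>
          by_cases hy : y > 0
          · simp [pvGoB, hx, hy]
          · rw [show pvGoB (x :: y :: rest) i = pvGoB rest (i + 1 + 1) from by
              rw [show pvGoB (x :: y :: rest) i = pvGoB (y :: rest) (i + 1) from by
                simp [pvGoB, hy]]
              exact pvGoB_cons_nonpos y rest (i + 1) hy]
            simp [hy]
      · have : pvGoA (x :: t) i 0 = pvGoA t (i + 1) 0 := by
          simp [pvGoA, hx]
        rw [this, h0, pvGoB_cons_nonpos x t i hx]
    · intro i
      by_cases hx : x > 0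
      · simp [pvGoA, hx]
      · simp [pvGoA, hx, h0]

theorem pvPos_ge (l : List Int) : ∀ (j p : Int), p ∈ pvPos l j → j ≤ p := by
  induction l with
  | nil => intro j p h; simp [pvPos] at h
  | cons x t ih =>
    intro j p h
    by_cases hx : x > 0
    · simp [pvPos, hx] at h
      rcases h with rfl | h
      · exact le_refl _
      · have := ih (j + 1) p h; omega
    · simp [pvPos, hx] at h
      have := ih (j + 1) p h; omega

theorem pvB_eq_goB (l : List Int) : ∀ (i : Int),
    (match pvFindAdj (pvPos l i) with
     | some p => p
     | none => i + (l.length : Int)) = pvGoB l i := by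
  induction l with
  | nil => intro i; simp [pvPos, pvFindAdj, pvGoB]
  | cons x t ih =>
    intro i
    by_cases hx : x > 0
    · cases t with
      | nil => simp [pvPos, pvFindAdj, pvGoB, hx]
      | cons y r =>
        by_cases hy : y > 0
        · simp [pvPos, pvFindAdj, pvGoB, hx, hy]
        · -- pvPos (x::y::r) i = i :: pvPos r (i+2), head of pvPos r (i+2) is ≥ i+2 ≠ i+1
          have hpos : pvPos (x :: y :: r) i = i :: pvPos r (i + 1 + 1) := by
            simp [pvPos, hx, hy]
          have hskip : pvFindAdj (i :: pvPos r (i + 1 + 1)) = pvFindAdj (pvPos r (i + 1 + 1)) := by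
            cases hr : pvPos r (i + 1 + 1) with
            | nil => simp [pvFindAdj]
            | cons q rest =>
              have hq : i + 1 + 1 ≤ q := pvPos_ge r (i + 1 + 1) q (by rw [hr]; simp)
              have : ¬ q = i + 1 := by omega
              simp [pvFindAdj, this]
          have hiht := ih (i + 1)
          rw [show pvPos (y :: r) (i + 1) = pvPos r (i + 1 + 1) from by simp [pvPos, hy]] at hiht
          rw [hpos, hskip]
          rw [pvGoB_cons_nonpos y r (i + 1) hy] at *
          have hgb : pvGoB (x :: y :: r) i = pvGoB (y :: r) (i + 1) := by
            simp [pvGoB, hy]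
          rw [hgb, pvGoB_cons_nonpos y r (i + 1) hy, ← hiht]
          cases pvFindAdj (pvPos r (i + 1 + 1)) with
          | none => simp only [List.length_cons]; push_cast; ring
          | some p => simp
    · have hpos : pvPos (x :: t) i = pvPos t (i + 1) := by simp [pvPos, hx]
      rw [hpos, pvGoB_cons_nonpos x t i hx, ← ih (i + 1)]
      cases pvFindAdj (pvPos t (i + 1)) with
      | none => simp only [List.length_cons]; push_cast; ring
      | some p => simp

-- ===== VERDICT (by name: the statement is the Claim_ definition above) =====
theorem first_consecutive_2_whites_spec : Claim_equal_first_consecutive_2_whites := by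
  intro arr _
  unfold Spec_first_consecutive_2_whites first_consecutive_2_whites first_consecutive_2_whites_alt
  have h := pvB_eq_goB arr 0
  rw [(pvGo_key arr).1 0, ← h]
  cases pvFindAdj (pvPos arr 0) with
  | none => simp
  | some p => simp
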